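-- pv_equiv track=rewrite | github.com/davidcbc/aoc | 2020/python/day11-2.py | seatEmpty
-- ===== SOURCE A (Python) =====
-- def seatEmpty(seats,x,y,dir):
--     if x < 0 or y < 0 or x == len(seats) or y == (len(seats[x])):
--         return True
--     if seats[x][y] == 'X':
--         return False
--     if seats[x][y] == 'L':
--         return True
--     nextX = x
--     nextY = y
--     if 'N' in dir:
--         nextY -= 1
--     if 'S' in dir:
--         nextY += 1
--     if 'E' in dir:
--         nextX += 1
--     if 'W' in dir:
--         nextX -= 1
--     return seatEmpty(seats, nextX, nextY, dir)
-- ===== SOURCE B (Python) =====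
-- def seatEmpty(seats, x, y, dir):
--     dx = ('E' in dir) - ('W' in dir)
--     dy = ('S' in dir) - ('N' in dir)
--     while True:
--         if x < 0 or y < 0 or x == len(seats) or y == len(seats[x]):
--             return True
--         if seats[x][y] == 'X':
--             return False
--         if seats[x][y] == 'L':
--             return True
--         x += dx
--         y += dy
-- ===== Notes on version B (the rewrite author's own statement) =====
-- stated objective: idiomatic
-- what changed: The tail recursion that re-tests all four direction letters at every step is replaced by an iterative while-loop scan whose step delta (dx, dy) is computed once from the direction string.
import Mathlib
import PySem

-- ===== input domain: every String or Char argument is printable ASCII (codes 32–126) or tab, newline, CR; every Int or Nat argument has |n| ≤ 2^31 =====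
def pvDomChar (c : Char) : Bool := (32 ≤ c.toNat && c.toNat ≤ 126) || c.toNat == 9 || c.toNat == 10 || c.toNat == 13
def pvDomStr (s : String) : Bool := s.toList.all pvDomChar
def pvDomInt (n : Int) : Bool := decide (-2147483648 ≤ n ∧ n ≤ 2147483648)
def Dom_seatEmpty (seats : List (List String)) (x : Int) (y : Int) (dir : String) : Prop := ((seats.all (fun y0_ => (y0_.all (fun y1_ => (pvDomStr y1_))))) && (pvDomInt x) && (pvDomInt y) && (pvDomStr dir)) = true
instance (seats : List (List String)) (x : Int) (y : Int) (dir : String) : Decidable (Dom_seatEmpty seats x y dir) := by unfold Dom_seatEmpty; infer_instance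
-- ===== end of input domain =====

-- B replaces A's tail recursion (which re-tests the four direction letters each step) by an
-- iterative scan with the step delta computed once; equally fast, more idiomatic.
-- Both Python versions fail to return outside Pre_ (A raises RecursionError/IndexError, B hangs or
-- raises IndexError); the Lean ports use a fuel bound that is never exhausted inside Pre_.

-- fuel bound: strictly more steps than any terminating ray can take (shared size bound, not part of either algorithm)
def pvFuel (seats : List (List String)) (x : Int) (y : Int) : Nat :=
  x.natAbs + y.natAbs + seats.length + (seats.map List.length).sum + 4

-- ===== PORT A =====
def seatEmptyGo (seats : List (List String)) (dir : String) : Nat → Int → Int → Bool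
  | 0, _, _ => true  -- fuel exhausted: unreachable inside Pre_ (Python A raises RecursionError on such rays)
  | n+1, x, y =>
    if x < 0 || y < 0 || x == (seats.length : Int) then true
    else
      match PySem.List.pyGet? seats x with
      | none => true  -- IndexError in Python (x > len); outside Pre_
      | some row =>
        if y == (row.length : Int) then true
        else
          match PySem.List.pyGet? row y with
          | none => true  -- IndexError in Python; outside Pre_
          | some s =>
            if s == "X" then false
            else if s == "L" then true
            else
              let nextX := x
              let nextY := y
              let nextY := if PySem.Str.isIn "N" dir then nextY - 1 else nextY
              let nextY := if PySem.Str.isIn "S" dir then nextY + 1 else nextY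
              let nextX := if PySem.Str.isIn "E" dir then nextX + 1 else nextX
              let nextX := if PySem.Str.isIn "W" dir then nextX - 1 else nextX
              seatEmptyGo seats dir n nextX nextY

def seatEmpty (seats : List (List String)) (x : Int) (y : Int) (dir : String) : Bool :=
  seatEmptyGo seats dir (pvFuel seats x y) x y

-- ===== PORT B =====
def scanRayGo (seats : List (List String)) (dx : Int) (dy : Int) : Nat → Int → Int → Bool
  | 0, _, _ => true  -- fuel exhausted: unreachable inside Pre_ (Python B's while loop does not terminate there)
  | n+1, x, y =>
    if x < 0 || y < 0 || x == (seats.length : Int) then true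
    else
      match PySem.List.pyGet? seats x with
      | none => true  -- IndexError in Python; outside Pre_
      | some row =>
        if y == (row.length : Int) then true
        else
          match PySem.List.pyGet? row y with
          | none => true  -- IndexError in Python; outside Pre_
          | some s =>
            if s == "X" then false
            else if s == "L" then true
            else scanRayGo seats dx dy n (x + dx) (y + dy)

def seatEmpty_alt (seats : List (List String)) (x : Int) (y : Int) (dir : String) : Bool :=
  let dx := (if PySem.Str.isIn "E" dir then (1 : Int) else 0) - (if PySem.Str.isIn "W" dir then (1 : Int) else 0)
  let dy := (if PySem.Str.isIn "S" dir then (1 : Int) else 0) - (if PySem.Str.isIn "N" dir then (1 : Int) else 0)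
  scanRayGo seats dx dy (pvFuel seats x y) x y

-- ===== PRECONDITION & SPEC =====
-- Does the ray stop (return) at step k?  (input inspection along the arithmetic ray, no recursion)
def pvStopAt (seats : List (List String)) (x : Int) (y : Int) (dx : Int) (dy : Int) (k : Nat) : Bool :=
  let a := x + k * dx
  let b := y + k * dy
  a < 0 || b < 0 || a == (seats.length : Int) ||
    (match PySem.List.pyGet? seats a with
     | none => false
     | some row =>
        b == (row.length : Int) ||
          (match PySem.List.pyGet? row b with
           | none => false
           | some s => s == "X" || s == "L"))

-- Is step k of the ray free of IndexError?
def pvSafeAt (seats : List (List String)) (x : Int) (y : Int) (dx : Int) (dy : Int) (k : Nat) : Bool :=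
  let a := x + k * dx
  let b := y + k * dy
  a < 0 || b < 0 || a == (seats.length : Int) ||
    (match PySem.List.pyGet? seats a with
     | none => false
     | some row => decide (b ≤ (row.length : Int)))

-- Pre_ = exactly the inputs on which Python A returns: a zero-delta ray must stop at its start
-- (else RecursionError), and every ray position up to the first stop is in range (else IndexError).
-- A moving ray stops or goes out of range within (number of grid cells)+2 steps, since the
-- positions visited before the first stop are distinct in-grid cells; so the bound below is exact.
def Pre_seatEmpty (seats : List (List String)) (x : Int) (y : Int) (dir : String) : Prop :=
  let dx := (if PySem.Str.isIn "E" dir then (1 : Int) else 0) - (if PySem.Str.isIn "W" dir then (1 : Int) else 0)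
  let dy := (if PySem.Str.isIn "S" dir then (1 : Int) else 0) - (if PySem.Str.isIn "N" dir then (1 : Int) else 0)
  ((dx = 0 ∧ dy = 0) → pvStopAt seats x y dx dy 0 = true)
    ∧ (∀ k : Nat, k < (seats.map List.length).sum + 2 →
        (∀ j : Nat, j < k → pvStopAt seats x y dx dy j = false) →
        pvSafeAt seats x y dx dy k = true)
instance (seats : List (List String)) (x : Int) (y : Int) (dir : String) : Decidable (Pre_seatEmpty seats x y dir) := by unfold Pre_seatEmpty; infer_instance

def pvWitness_seatEmpty : List (List String) × Int × Int × String := ([["L"]], 0, 0, "N")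

def Spec_seatEmpty (seats : List (List String)) (x : Int) (y : Int) (dir : String) (out : Bool) : Prop := out = seatEmpty_alt seats x y dir
instance (seats : List (List String)) (x : Int) (y : Int) (dir : String) (out : Bool) : Decidable (Spec_seatEmpty seats x y dir out) := by unfold Spec_seatEmpty; infer_instance

-- ===== CLAIM (what is proved, stated in full; the proofs are below) =====
def Claim_equal_seatEmpty : Prop := ∀ (seats : List (List String)) (x : Int) (y : Int) (dir : String), Dom_seatEmpty seats x y dir → Pre_seatEmpty seats x y dir → Spec_seatEmpty seats x y dir (seatEmpty seats x y dir)

-- ===== LEMMAS AND PROOFS =====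
theorem go_eq (seats : List (List String)) (dir : String) (n : Nat) (x y : Int) :
    seatEmptyGo seats dir n x y =
      scanRayGo seats
        ((if PySem.Str.isIn "E" dir then (1 : Int) else 0) - (if PySem.Str.isIn "W" dir then (1 : Int) else 0))
        ((if PySem.Str.isIn "S" dir then (1 : Int) else 0) - (if PySem.Str.isIn "N" dir then (1 : Int) else 0))
        n x y := by
  induction n generalizing x y with
  | zero => rfl
  | succ n ih =>
    simp only [seatEmptyGo, scanRayGo]
    have hx : (if PySem.Str.isIn "W" dir then (if PySem.Str.isIn "E" dir then x + 1 else x) - 1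
               else (if PySem.Str.isIn "E" dir then x + 1 else x)) =
        x + ((if PySem.Str.isIn "E" dir then (1 : Int) else 0) - (if PySem.Str.isIn "W" dir then (1 : Int) else 0)) := by
      split_ifs <;> ring
    have hy : (if PySem.Str.isIn "S" dir then (if PySem.Str.isIn "N" dir then y - 1 else y) + 1
               else (if PySem.Str.isIn "N" dir then y - 1 else y)) =
        y + ((if PySem.Str.isIn "S" dir then (1 : Int) else 0) - (if PySem.Str.isIn "N" dir then (1 : Int) else 0)) := by
      split_ifs <;> ring
    rw [hx, hy]
    split
    · rfl
    · cases PySem.List.pyGet? seats x with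
      | none => rfl
      | some row =>
        simp only []
        split
        · rfl
        · cases PySem.List.pyGet? row y with
          | none => rfl
          | some s =>
            simp only []
            split
            · rfl
            · split
              · rfl
              · exact ih _ _

-- ===== VERDICT (by name: the statement is the Claim_ definition above) =====
theorem seatEmpty_spec : Claim_equal_seatEmpty := by
  intro seats x y dir _ _
  unfold Spec_seatEmpty seatEmpty seatEmpty_alt
  exact go_eq seats dir (pvFuel seats x y) x y
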